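/- GENERATED by farm/mkstatement.py from design/units.tsv (unit `start_decoder.C6b`) and the assertions of Vorbis/Spec/StartDecoderC6.lean — do not edit.
   THE STATEMENT of the proof unit `start_decoder.C6b`: segment C6b of `start_decoder` (13 instructions; entries 0x1148b0;
   exits 0x113b22,0x1146d2; ranges 0x1148b0-0x1148cb + 0x1148d0-0x1148e2)
   takes each of its entry assertions to one of its exit assertions (`Vorbis.Spec.StartDecoder.SegC6b`), given the contracts of its callees.
   What the names mean: Vorbis/Spec/Basic.lean (the shared hypotheses), Vorbis/Spec/StartDecoderC6.lean (the assertions). The theorem to prove: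
   `theorem start_decoder_C6b_ok : Vorbis.Spec.start_decoder_C6b.Statement`. -/
import Vorbis.Spec.Leaves
import Vorbis.Spec.StartDecoderC6
namespace Vorbis.Spec.start_decoder_C6b
open X86 X86.User Asan

/-- The statement of unit `start_decoder.C6b`. -/
def Statement : Prop :=
  ∀ (Lay : Layout) (_hLay : Lay.hi = 0x1000000) (μ : Microarch) (_hμ : UserX.MicroOK μ) (u₀ : State)
    (_hcode : HasCodeNat Lay u₀ Vorbis.L.start_decoder.entry Vorbis.Code.code_start_decoder.nat Vorbis.L.start_decoder.size)
    (_h_error : ∀ (others : List Obj) (frames : List (Nat × FrameLayout)), Calls Lay μ Vorbis.WayInv (Vorbis.conv u₀) Vorbis.L.error.entry (Vorbis.Spec.error.spec others frames))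
    (_h_asan_store8_noabort : Asan.SmallCheck Lay μ Vorbis.WayInv (Vorbis.CodeOK u₀) [.rax, .rcx, .rdx] 8 Vorbis.L.__asan_store8_noabort.entry),
    Vorbis.Spec.StartDecoder.SegC6b Lay μ u₀

end Vorbis.Spec.start_decoder_C6b
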